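-- pv_equiv track=rewrite | github.com/levelslh1213/passive_voice_automaton | main.py | GetKeyForReturn
-- ===== SOURCE A (Python) =====
-- def GetKeyForReturn(tokens:list, keys:list):
--
--   keys.reverse()
--   tokens.reverse()
--
--   __verb = None
--   __age = None
--   __suj = None
--
--   #Atribui tokens para nossos retornos
--   __verb = next((keys[index] for index, key in enumerate(tokens) if key == '__verb__'), None)
--   __age = next((keys[index] for index, key in enumerate(tokens) if key == '__age__'), None)
--   __suj = next((keys[index] for index, key in enumerate(tokens) if key == '__suj__'), None)
--
--   return ('F(intenção) = ' + __verb, 'F(agente) = ' + __age, 'F(sujeito) = ' + __suj)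
-- ===== SOURCE B (Python) =====
-- def GetKeyForReturn(tokens: list, keys: list):
--
--     keys.reverse()
--     tokens.reverse()
--
--     markers = ('__verb__', '__age__', '__suj__')
--     found = {}
--     # single pass: record, for each marker, the key at its first position (after reverse)
--     for index, key in enumerate(tokens):
--         if key in markers and key not in found:
--             found[key] = keys[index]
--
--     return ('F(intenção) = ' + found.get('__verb__'),
--             'F(agente) = ' + found.get('__age__'),
--             'F(sujeito) = ' + found.get('__suj__'))
-- ===== Notes on version B (the rewrite author's own statement) =====
-- stated objective: simpler
-- what changed: Replaces A's three separate generator scans over the reversed token list by one index-building pass that records each marker's first key in a dict, then assembles the tuple from the dict.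
import Mathlib
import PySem

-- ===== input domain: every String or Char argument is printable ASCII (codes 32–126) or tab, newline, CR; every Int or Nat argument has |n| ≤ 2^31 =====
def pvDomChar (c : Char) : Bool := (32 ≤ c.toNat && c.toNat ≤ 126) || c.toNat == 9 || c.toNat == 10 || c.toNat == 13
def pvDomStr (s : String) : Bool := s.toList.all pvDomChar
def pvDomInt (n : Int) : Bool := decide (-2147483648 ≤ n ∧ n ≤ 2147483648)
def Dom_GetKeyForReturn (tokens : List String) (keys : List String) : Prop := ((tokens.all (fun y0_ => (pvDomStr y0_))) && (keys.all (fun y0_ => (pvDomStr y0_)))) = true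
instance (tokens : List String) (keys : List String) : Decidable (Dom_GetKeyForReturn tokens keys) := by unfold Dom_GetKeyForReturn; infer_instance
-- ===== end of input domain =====

-- B replaces A's three generator scans by one dict-building pass; both A and B reverse the
-- `tokens` and `keys` arguments in place (identical mutation); the theorems are about the return value.

-- ===== PORT A =====
-- next((keys[index] for index, key in enumerate(tokens) if key == m), None)
def pyNextKey (tks ks : List String) (m : String) : Option String :=
  match (PySem.List.enumerate tks).find? (fun p => p.2 == m) with
  | some (i, _) => PySem.List.pyGet? ks i   -- none = IndexError, excluded by Pre_
  | none => none

def GetKeyForReturn (tokens : List String) (keys : List String) : String × String × String :=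
  let ks := keys.reverse
  let tks := tokens.reverse
  let vrb := pyNextKey tks ks "__verb__"
  let age := pyNextKey tks ks "__age__"
  let suj := pyNextKey tks ks "__suj__"
  -- '+' with None = TypeError, excluded by Pre_; .getD "" is never reached inside Pre_
  ("F(intenção) = " ++ vrb.getD "", "F(agente) = " ++ age.getD "", "F(sujeito) = " ++ suj.getD "")

-- ===== PORT B =====
def altStep (ks : List String) (d : PySem.Dict String String) (p : Int × String) : PySem.Dict String String :=
  if (p.2 == "__verb__" || p.2 == "__age__" || p.2 == "__suj__") && !(d.contains p.2)
  then d.insert p.2 ((PySem.List.pyGet? ks p.1).getD "")   -- none = IndexError, excluded by Pre_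
  else d

def GetKeyForReturn_alt (tokens : List String) (keys : List String) : String × String × String :=
  let ks := keys.reverse
  let tks := tokens.reverse
  let found := (PySem.List.enumerate tks).foldl (altStep ks) PySem.Dict.empty
  ("F(intenção) = " ++ (found.get? "__verb__").getD "",
   "F(agente) = " ++ (found.get? "__age__").getD "",
   "F(sujeito) = " ++ (found.get? "__suj__").getD "")

-- ===== PRECONDITION & SPEC =====
-- Pre_ excludes exactly the inputs where Python A raises: a missing marker (TypeError from
-- '+ None') or a marker whose first position in the reversed tokens is ≥ len(keys) (IndexError).
def Pre_GetKeyForReturn (tokens : List String) (keys : List String) : Prop :=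
  ("__verb__" ∈ tokens.reverse ∧ tokens.reverse.idxOf "__verb__" < keys.length) ∧
  ("__age__" ∈ tokens.reverse ∧ tokens.reverse.idxOf "__age__" < keys.length) ∧
  ("__suj__" ∈ tokens.reverse ∧ tokens.reverse.idxOf "__suj__" < keys.length)
instance (tokens : List String) (keys : List String) : Decidable (Pre_GetKeyForReturn tokens keys) := by unfold Pre_GetKeyForReturn; infer_instance

def pvWitness_GetKeyForReturn : List String × List String :=
  (["__suj__", "__age__", "__verb__"], ["a", "b", "c"])

def Spec_GetKeyForReturn (tokens : List String) (keys : List String) (out : String × String × String) : Prop := out = GetKeyForReturn_alt tokens keys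
instance (tokens : List String) (keys : List String) (out : String × String × String) : Decidable (Spec_GetKeyForReturn tokens keys out) := by unfold Spec_GetKeyForReturn; infer_instance

-- ===== CLAIM (what is proved, stated in full; the proofs are below) =====
def Claim_equal_GetKeyForReturn : Prop := ∀ (tokens : List String) (keys : List String), Dom_GetKeyForReturn tokens keys → Pre_GetKeyForReturn tokens keys → Spec_GetKeyForReturn tokens keys (GetKeyForReturn tokens keys)

-- ===== LEMMAS AND PROOFS =====

-- the dict built by B's single pass answers each marker query with the key at the first match
theorem foldl_altStep_get? (ks : List String) (l : List (Int × String))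
    (d : PySem.Dict String String) (m : String)
    (hm : m = "__verb__" ∨ m = "__age__" ∨ m = "__suj__") :
    ((l.foldl (altStep ks) d).get? m) =
      (d.get? m).or ((l.find? (fun p => p.2 == m)).map
        (fun p => some ((PySem.List.pyGet? ks p.1).getD "")) |>.join) := by
  induction l generalizing d with
  | nil => simp
  | cons p l ih =>
    by_cases hpm : p.2 = m
    · subst hpm
      simp only [List.foldl_cons, List.find?_cons, beq_self_eq_true]
      rw [ih _]
      unfold altStep
      rcases hcd : d.get? p.2 with _ | v
      · have hc : d.contains p.2 = false := by
          rw [PySem.Dict.contains_eq_isSome_get?, hcd]; rfl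
        have : ((p.2 == "__verb__" || p.2 == "__age__" || p.2 == "__suj__") && !(d.contains p.2)) = true := by
          rcases hm with h | h | h <;> simp [h] <;> rw [← h] <;> exact hc
        rw [if_pos this, PySem.Dict.get?_insert_self]
        simp
      · have hc : d.contains p.2 = true := by
          rw [PySem.Dict.contains_eq_isSome_get?, hcd]; rfl
        have : ((p.2 == "__verb__" || p.2 == "__age__" || p.2 == "__suj__") && !(d.contains p.2)) = false := by
          simp [hc]
        rw [if_neg (by simp [this]), hcd]
        simp
    · simp only [List.foldl_cons, List.find?_cons]
      have hb : (p.2 == m) = false := by simp [hpm]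
      rw [hb]

      rw [ih _]
      unfold altStep
      split
      · rw [PySem.Dict.get?_insert_of_ne _ _ (fun h => hpm h.symm)]
      · rfl

theorem key_agree (tks ks : List String) (m : String)
    (hm : m = "__verb__" ∨ m = "__age__" ∨ m = "__suj__") :
    (pyNextKey tks ks m).getD "" =
      (((PySem.List.enumerate tks).foldl (altStep ks) PySem.Dict.empty).get? m).getD "" := by
  rw [foldl_altStep_get? ks _ _ m hm, PySem.Dict.get?_empty]
  unfold pyNextKey
  rcases h : (PySem.List.enumerate tks).find? (fun p => p.2 == m) with _ | ⟨i, s⟩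
  · simp [h]
  · simp [h]

-- ===== VERDICT (by name: the statement is the Claim_ definition above) =====
theorem GetKeyForReturn_spec : Claim_equal_GetKeyForReturn := by
  intro tokens keys _ _
  show GetKeyForReturn tokens keys = GetKeyForReturn_alt tokens keys
  unfold GetKeyForReturn GetKeyForReturn_alt
  simp only
  rw [key_agree _ _ "__verb__" (Or.inl rfl),
      key_agree _ _ "__age__" (Or.inr (Or.inl rfl)),
      key_agree _ _ "__suj__" (Or.inr (Or.inr rfl))]
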